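-- pv_equiv track=rewrite | github.com/SonDo580/dsa-leetcode | 9-Backtracking/9.2-MoreConstrained/06.combination-sum-3.py | combinations_with_target_sum_3
-- ===== SOURCE A (Python) =====
-- def combinations_with_target_sum_3(k: int, n: int) -> list[list[int]]:
--     answer: list[list[int]] = []
--
--     def backtrack(current: list[int], start: int, current_sum: int):
--         if len(current) == k and current_sum == n:
--             # - We mutate 'current' across 'backtrack' calls,
--             #   -> create a copy of 'current' when adding
--             answer.append(current[:])
--             return
--
--         for num in range(start, 10):
--             next_sum = current_sum + num
--             if next_sum <= n:
--                 current.append(num)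
--                 backtrack(current, num + 1, next_sum)
--                 current.pop()
--
--     backtrack(current=[], start=1, current_sum=0)
--     return answer
-- ===== SOURCE B (Python) =====
-- from itertools import combinations
--
-- def combinations_with_target_sum_3(k: int, n: int) -> list[list[int]]:
--     if k < 0 or k > 9:
--         return []
--     return [list(c) for c in combinations(range(1, 10), k) if sum(c) == n]
-- ===== Notes on version B (the rewrite author's own statement) =====
-- stated objective: idiomatic
-- what changed: Replaces the recursive backtracking with sum-pruning by a direct enumeration of all k-combinations of 1..9 via itertools.combinations, filtered by target sum (guarding k<0, where combinations would raise).
import Mathlib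
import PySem

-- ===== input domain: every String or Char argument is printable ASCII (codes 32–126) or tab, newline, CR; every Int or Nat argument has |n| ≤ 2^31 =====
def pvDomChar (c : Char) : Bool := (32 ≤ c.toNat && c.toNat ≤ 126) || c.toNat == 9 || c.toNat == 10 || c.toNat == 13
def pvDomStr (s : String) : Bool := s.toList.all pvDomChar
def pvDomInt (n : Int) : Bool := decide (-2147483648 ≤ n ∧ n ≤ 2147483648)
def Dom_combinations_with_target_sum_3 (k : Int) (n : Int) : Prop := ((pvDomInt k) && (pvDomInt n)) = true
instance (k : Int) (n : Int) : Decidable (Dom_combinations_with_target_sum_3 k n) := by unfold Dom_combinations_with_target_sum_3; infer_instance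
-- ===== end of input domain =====

-- B replaces A's recursive backtracking by enumerating all k-combinations of 1..9
-- and filtering by target sum (idiomatic; same return value everywhere).

-- ===== PORT A =====
/-- The nested `backtrack` of A. The `fuel` parameter only makes the recursion
    structural: on every recursive call `start` strictly increases and the loop is
    over `range(start, 10)`, so with fuel 10 from `start = 1` it is never exhausted. -/
def pvBacktrack (k n : Int) : Nat → List Int → Int → Int → List (List Int) → List (List Int)
  | 0, _, _, _, answer => answer
  | fuel+1, current, start, csum, answer =>
    if ((current.length : Int) = k ∧ csum = n) then
      answer ++ [current]
    else
      (PySem.List.pyRange start 10 1).foldl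
        (fun acc num =>
          if csum + num ≤ n then
            pvBacktrack k n fuel (current ++ [num]) (num + 1) (csum + num) acc
          else acc)
        answer

def combinations_with_target_sum_3 (k : Int) (n : Int) : List (List Int) :=
  pvBacktrack k n 10 [] 1 0 []

-- ===== PORT B =====
/-- `itertools.combinations(xs, m)` for a list of ints (lexicographic order). -/
def pvCombos : Nat → List Int → List (List Int)
  | 0, _ => [[]]
  | _+1, [] => []
  | m+1, x :: xs => (pvCombos m xs).map (fun l => x :: l) ++ pvCombos (m+1) xs

def combinations_with_target_sum_3_alt (k : Int) (n : Int) : List (List Int) :=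
  if k < 0 ∨ 9 < k then []
  else (pvCombos k.toNat (PySem.List.pyRange 1 10 1)).filter (fun l => l.sum == n)

-- ===== PRECONDITION & SPEC =====
def Spec_combinations_with_target_sum_3 (k : Int) (n : Int) (out : List (List Int)) : Prop := out = combinations_with_target_sum_3_alt k n
instance (k : Int) (n : Int) (out : List (List Int)) : Decidable (Spec_combinations_with_target_sum_3 k n out) := by unfold Spec_combinations_with_target_sum_3; infer_instance

-- ===== CLAIM (what is proved, stated in full; the proofs are below) =====
def Claim_equal_combinations_with_target_sum_3 : Prop := ∀ (k : Int) (n : Int), Dom_combinations_with_target_sum_3 k n → Spec_combinations_with_target_sum_3 k n (combinations_with_target_sum_3 k n)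

-- ===== LEMMAS AND PROOFS =====

/-- The results `pvBacktrack` appends for state `(current, start, csum)`:
    the combinations drawn from `xs` of the missing length whose sum completes `n`. -/
def pvRhs (k n csum : Int) (current : List Int) (xs : List Int) : List (List Int) :=
  if 0 ≤ k - (current.length : Int) then
    ((pvCombos (k - (current.length : Int)).toNat xs).filter
        (fun l => csum + l.sum == n)).map (fun l => current ++ l)
  else []

lemma pvCombos_eq_nil_of_length_lt : ∀ (m : Nat) (xs : List Int), xs.length < m → pvCombos m xs = [] := by
  intro m xs
  induction xs generalizing m with
  | nil => intro h; cases m with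
    | zero => omega
    | succ m => rfl
  | cons x xs ih =>
    intro h
    cases m with
    | zero => simp at h
    | succ m =>
      simp only [List.length_cons] at h
      simp only [pvCombos, ih m (by omega), ih (m+1) (by omega), List.map_nil, List.nil_append]

lemma pvCombos_sublist : ∀ (m : Nat) (xs l : List Int), l ∈ pvCombos m xs → l.Sublist xs := by
  intro m xs
  induction xs generalizing m with
  | nil =>
    intro l hl
    cases m with
    | zero => simp [pvCombos] at hl; simp [hl]
    | succ m => simp [pvCombos] at hl
  | cons x xs ih =>
    intro l hl
    cases m with
    | zero => simp [pvCombos] at hl; simp [hl]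
    | succ m =>
      simp [pvCombos] at hl
      rcases hl with ⟨l', hl', rfl⟩ | hl
      · exact (ih m l' hl').cons₂ x
      · exact (ih (m+1) l hl).cons x

lemma pvCombos_sum_nonneg (m : Nat) (s : Int) (hs : 1 ≤ s) (l : List Int)
    (hl : l ∈ pvCombos m (PySem.List.pyRange s 10 1)) : 0 ≤ l.sum := by
  apply List.sum_nonneg
  intro x hx
  have hmem := (pvCombos_sublist m _ l hl).mem hx
  have := (PySem.List.mem_pyRange_one).1 hmem
  omega

lemma pvBacktrack_eq (fuel : Nat) :
    ∀ (start : Int), 1 ≤ start → start ≤ 10 → 10 - start < (fuel : Int) →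
    ∀ (k n csum : Int) (current : List Int) (answer : List (List Int)),
      pvBacktrack k n fuel current start csum answer
        = answer ++ pvRhs k n csum current (PySem.List.pyRange start 10 1) := by
  induction fuel with
  | zero => intro start h1 h10 h2; omega
  | succ fuel ih =>
    intro start h1 h10 h2 k n csum current answer
    show (if ((current.length : Int) = k ∧ csum = n) then _ else _) = _
    by_cases hbase : ((current.length : Int) = k ∧ csum = n)
    · rw [if_pos hbase]
      obtain ⟨hk, hn⟩ := hbase
      have hm : k - (current.length : Int) = 0 := by omega
      simp [pvRhs, hm, pvCombos, hn]
    · rw [if_neg hbase]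
      -- the loop over range(start, 10)
      have loop : ∀ (d : Nat) (s : Int), 1 ≤ s → 10 - s ≤ (d : Int) → 10 - s ≤ (fuel : Int) →
          ∀ (acc : List (List Int)),
          (PySem.List.pyRange s 10 1).foldl
            (fun acc num =>
              if csum + num ≤ n then
                pvBacktrack k n fuel (current ++ [num]) (num + 1) (csum + num) acc
              else acc) acc
          = acc ++ (if 1 ≤ k - (current.length : Int) then
              ((pvCombos (k - (current.length : Int)).toNat (PySem.List.pyRange s 10 1)).filter
                  (fun l => csum + l.sum == n)).map (fun l => current ++ l)
            else []) := by
        intro d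
        induction d with
        | zero =>
          intro s hs1 hsd hsf acc
          have hnil : PySem.List.pyRange s 10 1 = [] := PySem.List.pyRange_one_eq_nil (by omega)
          rw [hnil]
          by_cases hm : 1 ≤ k - (current.length : Int)
          · have ht : (k - (current.length : Int)).toNat = (k - (current.length : Int) - 1).toNat + 1 := by omega
            rw [if_pos hm, ht]
            simp only [pvCombos, List.filter_nil, List.map_nil, List.foldl_nil, List.append_nil]
          · rw [if_neg hm]
            simp only [List.foldl_nil, List.append_nil]
        | succ d ihd =>
          intro s hs1 hsd hsf acc
          by_cases hslt : s < 10
          · rw [PySem.List.pyRange_one_cons hslt]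
            rw [List.foldl_cons]
            -- head step
            have hrest : ∀ acc', (PySem.List.pyRange (s+1) 10 1).foldl
                (fun acc num =>
                  if csum + num ≤ n then
                    pvBacktrack k n fuel (current ++ [num]) (num + 1) (csum + num) acc
                  else acc) acc'
                = acc' ++ (if 1 ≤ k - (current.length : Int) then
                    ((pvCombos (k - (current.length : Int)).toNat (PySem.List.pyRange (s+1) 10 1)).filter
                        (fun l => csum + l.sum == n)).map (fun l => current ++ l)
                  else []) := by
              intro acc'; exact ihd (s+1) (by omega) (by omega) (by omega) acc'
            by_cases hm : 1 ≤ k - (current.length : Int)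
            · -- decompose the combinations of s :: rest
              have hmt : (k - (current.length : Int)).toNat
                  = (k - (current.length : Int) - 1).toNat + 1 := by omega
              have hlen' : k - ((current ++ [s]).length : Int)
                  = k - (current.length : Int) - 1 := by
                simp; omega
              by_cases hp : csum + s ≤ n
              · rw [if_pos hp]
                rw [ih (s+1) (by omega) (by omega) (by omega) k n (csum + s) (current ++ [s]) acc]
                rw [hrest]
                rw [pvRhs, if_pos (by rw [hlen']; omega), hlen']
                rw [hmt]
                simp only [pvCombos, hm, if_pos]
                rw [List.filter_append, List.map_append, List.append_assoc]
                congr 1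
                rw [List.filter_map, List.map_map]
                have hfun : ((fun l => current ++ l) ∘ (fun l : List Int => s :: l))
                    = (fun l : List Int => current ++ [s] ++ l) := by
                  funext l; simp
                rw [hfun]
                congr 1
                congr 1
                apply List.filter_congr
                intro l _
                simp only [Function.comp_apply, List.sum_cons]
                congr 1
                omega
              · rw [if_neg hp]
                rw [hrest]
                rw [hmt]
                simp only [pvCombos, hm, if_pos]
                rw [List.filter_append, List.map_append]
                have hhead : (List.filter (fun l => csum + l.sum == n)
                    ((pvCombos (k - (current.length : Int) - 1).toNat (PySem.List.pyRange (s+1) 10 1)).map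
                      (fun l => s :: l))) = [] := by
                  rw [List.filter_eq_nil_iff]
                  intro l hl
                  simp only [List.mem_map] at hl
                  obtain ⟨l', hl', rfl⟩ := hl
                  have := pvCombos_sum_nonneg _ (s+1) (by omega) l' hl'
                  simp only [List.sum_cons, beq_iff_eq]
                  omega
                rw [hhead]
                simp
            · -- nothing left to collect: every deeper call appends nothing
              by_cases hp : csum + s ≤ n
              · rw [if_pos hp]
                rw [ih (s+1) (by omega) (by omega) (by omega) k n (csum + s) (current ++ [s]) acc]
                have : pvRhs k n (csum + s) (current ++ [s]) (PySem.List.pyRange (s+1) 10 1) = [] := by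
                  rw [pvRhs, if_neg]
                  simp; omega
                rw [this, List.append_nil, hrest, if_neg hm, if_neg hm]
              · rw [if_neg hp, hrest, if_neg hm, if_neg hm]
          · have hnil : PySem.List.pyRange s 10 1 = [] := PySem.List.pyRange_one_eq_nil (by omega)
            rw [hnil]
            by_cases hm : 1 ≤ k - (current.length : Int)
            · have ht : (k - (current.length : Int)).toNat = (k - (current.length : Int) - 1).toNat + 1 := by omega
              rw [if_pos hm, ht]
              simp only [pvCombos, List.filter_nil, List.map_nil, List.foldl_nil, List.append_nil]
            · rw [if_neg hm]
              simp only [List.foldl_nil, List.append_nil]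
      rw [loop 10 start h1 (by omega) (by omega) answer]
      congr 1
      rw [pvRhs]
      by_cases hm : 1 ≤ k - (current.length : Int)
      · rw [if_pos hm, if_pos (by omega)]
      · rw [if_neg hm]
        by_cases hm0 : 0 ≤ k - (current.length : Int)
        · have : k - (current.length : Int) = 0 := by omega
          rw [if_pos hm0, this]
          have hcn : csum ≠ n := by
            intro h; exact hbase ⟨by omega, h⟩
          simp [pvCombos, hcn]
        · rw [if_neg hm0]

-- ===== VERDICT (by name: the statement is the Claim_ definition above) =====
theorem combinations_with_target_sum_3_spec : Claim_equal_combinations_with_target_sum_3 := by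
  intro k n _hdom
  show combinations_with_target_sum_3 k n = combinations_with_target_sum_3_alt k n
  rw [combinations_with_target_sum_3,
      pvBacktrack_eq 10 1 (by omega) (by omega) (by omega) k n 0 [] []]
  rw [combinations_with_target_sum_3_alt, pvRhs]
  by_cases hk : k < 0 ∨ 9 < k
  · rw [if_pos hk]
    rcases hk with hk | hk
    · rw [if_neg (by simp; omega)]
      simp
    · rw [if_pos (by simp; omega)]
      simp only [List.length_nil, Int.natCast_zero, sub_zero]
      rw [pvCombos_eq_nil_of_length_lt k.toNat _ (by rw [PySem.List.length_pyRange_one]; omega)]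
      simp
  · rw [if_neg hk, if_pos (by simp; omega)]
    simp only [List.length_nil, Int.natCast_zero, sub_zero, List.nil_append, zero_add,
      List.map_id_fun', id]
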